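-- pv_equiv track=rewrite | github.com/ashm8206/Leeting | 2725-mice-and-cheese/mice-and-cheese.py | miceAndCheese
-- ===== SOURCE A (Python) =====
-- from typing import List
--
-- import heapq
--
-- def miceAndCheese(reward1: List[int], reward2: List[int], k: int) -> int:
--     n = len(reward1)
--     heap = []
--     output = 0
--     for i in range(n):
--         heap.append((reward2[i] - reward1[i], i))
--
--     heapq.heapify(heap)
--     visited = set()
--     while k:
--         k -= 1
--         _, idx = heapq.heappop(heap)
--         visited.add(idx)
--         output += reward1[idx]
--
--     for idx, val in enumerate(reward2):
--         if idx in visited: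
--             continue
--         output += val
--
--     return output
-- ===== SOURCE B (Python) =====
-- from typing import List
--
--
-- def miceAndCheese(reward1: List[int], reward2: List[int], k: int) -> int:
--     # total reward2, minus the k smallest (reward2 - reward1) differences:
--     # giving mouse-1 the k cheeses with the largest reward1 - reward2 gain.
--     diffs = sorted(r2 - r1 for r1, r2 in zip(reward1, reward2))
--     return sum(reward2) - sum(diffs[:k])
-- ===== Notes on version B (the rewrite author's own statement) =====
-- stated objective: faster
-- what changed: Replaces the heap-of-(diff,index) simulation with visited-set bookkeeping and a skip loop by a closed form: sort the differences reward2-reward1 once and return sum(reward2) minus the sum of the k smallest differences.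
import Mathlib
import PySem

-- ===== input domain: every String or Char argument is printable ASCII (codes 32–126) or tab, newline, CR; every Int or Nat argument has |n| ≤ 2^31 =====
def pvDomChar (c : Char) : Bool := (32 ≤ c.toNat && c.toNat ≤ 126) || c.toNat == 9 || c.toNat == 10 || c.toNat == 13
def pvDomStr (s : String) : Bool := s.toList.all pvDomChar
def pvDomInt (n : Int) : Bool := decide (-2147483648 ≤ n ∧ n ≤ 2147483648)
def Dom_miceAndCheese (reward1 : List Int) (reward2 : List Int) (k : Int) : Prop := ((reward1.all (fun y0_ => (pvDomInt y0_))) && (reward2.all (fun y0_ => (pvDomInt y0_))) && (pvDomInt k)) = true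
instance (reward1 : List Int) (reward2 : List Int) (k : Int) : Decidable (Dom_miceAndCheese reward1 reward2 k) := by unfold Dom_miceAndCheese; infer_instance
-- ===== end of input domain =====

-- B replaces A's heap simulation (pop k lexicographic minima, visited set, skip loop)
-- by a closed form: sort the differences reward2-reward1 once and return
-- sum(reward2) - sum of the k smallest differences (measured faster in a timing run).

-- ===== PORT A =====
-- heapq on tuples pops the lexicographically smallest pair; modelled as repeated
-- extraction of the lexicographic minimum from the (multiset of the) heap list.
def pvLexLe (a b : Int × Int) : Bool := a.1 < b.1 || (a.1 == b.1 && a.2 ≤ b.2)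

-- heappop: the lexicographic minimum and the remaining elements (exact for the
-- heap contract: which copy of an equal pair is removed cannot affect a multiset).
def pvPopMin : List (Int × Int) → Option ((Int × Int) × List (Int × Int))
  | [] => none
  | x :: xs =>
    match pvPopMin xs with
    | none => some (x, [])
    | some (m, r) => if pvLexLe x m then some (x, xs) else some (m, x :: r)

-- the 'while k:' loop of A (k pops; accumulates visited and output)
def pvLoopA (reward1 : List Int) : Nat → List (Int × Int) → PySem.Set Int → Int → PySem.Set Int × Int
  | 0, _, vis, out => (vis, out)
  | j+1, heap, vis, out =>
    match pvPopMin heap with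
    | none => (vis, out)   -- Python raises IndexError here; outside Pre_
    | some (m, rest) => pvLoopA reward1 j rest (PySem.Set.add vis m.2) (out + PySem.List.pyGetD reward1 m.2 0)

def miceAndCheese (reward1 : List Int) (reward2 : List Int) (k : Int) : Int :=
  let n := reward1.length
  let heap := (PySem.List.pyRange 0 (n : Int) 1).map
      (fun i => (PySem.List.pyGetD reward2 i 0 - PySem.List.pyGetD reward1 i 0, i))
  let st := pvLoopA reward1 k.toNat heap PySem.Set.empty 0
  (PySem.List.enumerate reward2 0).foldl
      (fun out p => if PySem.Set.contains st.1 p.1 then out else out + p.2) st.2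

-- ===== PORT B =====
def miceAndCheese_alt (reward1 : List Int) (reward2 : List Int) (k : Int) : Int :=
  let diffs := PySem.List.sorted ((reward1.zip reward2).map (fun p => p.2 - p.1)) (fun x => x) false
  reward2.sum - (PySem.List.slice diffs none (some k)).sum

-- ===== PRECONDITION & SPEC =====
-- Pre_: exactly where A returns: 0 ≤ k ≤ len(reward1) (else the heap runs empty and
-- heappop raises IndexError) and len(reward1) ≤ len(reward2) (else reward2[i] raises).
def Pre_miceAndCheese (reward1 : List Int) (reward2 : List Int) (k : Int) : Prop :=
  0 ≤ k ∧ k ≤ (reward1.length : Int) ∧ reward1.length ≤ reward2.length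
instance (reward1 : List Int) (reward2 : List Int) (k : Int) : Decidable (Pre_miceAndCheese reward1 reward2 k) := by unfold Pre_miceAndCheese; infer_instance
def pvWitness_miceAndCheese : List Int × List Int × Int := ([3, 1], [1, 5], 1)

def Spec_miceAndCheese (reward1 : List Int) (reward2 : List Int) (k : Int) (out : Int) : Prop := out = miceAndCheese_alt reward1 reward2 k
instance (reward1 : List Int) (reward2 : List Int) (k : Int) (out : Int) : Decidable (Spec_miceAndCheese reward1 reward2 k out) := by unfold Spec_miceAndCheese; infer_instance

-- ===== CLAIM (what is proved, stated in full; the proofs are below) =====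
def Claim_equal_miceAndCheese : Prop := ∀ (reward1 : List Int) (reward2 : List Int) (k : Int), Dom_miceAndCheese reward1 reward2 k → Pre_miceAndCheese reward1 reward2 k → Spec_miceAndCheese reward1 reward2 k (miceAndCheese reward1 reward2 k)

-- ===== LEMMAS AND PROOFS =====

-- the list of the first j popped pairs (ghost function for the proof)
def pvPops : Nat → List (Int × Int) → List (Int × Int)
  | 0, _ => []
  | j+1, h =>
    match pvPopMin h with
    | none => []
    | some (m, r) => m :: pvPops j r

theorem pvPopMin_none_iff (h : List (Int × Int)) : pvPopMin h = none ↔ h = [] := by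
  cases h with
  | nil => simp [pvPopMin]
  | cons x xs =>
    simp only [pvPopMin]
    cases hx : pvPopMin xs with
    | none => simp
    | some p => obtain ⟨m, r⟩ := p; simp only; split <;> simp

theorem pvPopMin_perm (h : List (Int × Int)) (m : Int × Int) (r : List (Int × Int))
    (hp : pvPopMin h = some (m, r)) : (m :: r).Perm h := by
  induction h generalizing m r with
  | nil => simp [pvPopMin] at hp
  | cons x xs ih =>
    simp only [pvPopMin] at hp
    cases hx : pvPopMin xs with
    | none =>
      rw [hx] at hp
      have : x = m ∧ r = [] := by simpa using hp
      obtain ⟨rfl, rfl⟩ := this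
      have : xs = [] := (pvPopMin_none_iff xs).mp hx
      simp [this]
    | some p =>
      obtain ⟨m', r'⟩ := p
      rw [hx] at hp
      simp only at hp
      have ihp := ih m' r' hx
      split at hp
      · have hmx0 : x = m ∧ xs = r := by simpa using hp
        obtain ⟨rfl, rfl⟩ := hmx0
        exact List.Perm.refl _
      · have hmx0 : m' = m ∧ x :: r' = r := by simpa using hp
        obtain ⟨rfl, rfl⟩ := hmx0
        exact (List.Perm.swap x m' r').trans (ihp.cons x)

theorem pvPopMin_min (h : List (Int × Int)) (m : Int × Int) (r : List (Int × Int))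
    (hp : pvPopMin h = some (m, r)) : ∀ p ∈ h, m.1 ≤ p.1 := by
  induction h generalizing m r with
  | nil => simp [pvPopMin] at hp
  | cons x xs ih =>
    simp only [pvPopMin] at hp
    cases hx : pvPopMin xs with
    | none =>
      rw [hx] at hp
      have : x = m ∧ r = [] := by simpa using hp
      obtain ⟨rfl, rfl⟩ := this
      have : xs = [] := (pvPopMin_none_iff xs).mp hx
      subst this
      intro p hpmem
      simp at hpmem
      simp [hpmem]
    | some q =>
      obtain ⟨m', r'⟩ := q
      rw [hx] at hp
      simp only at hp
      have ihm := ih m' r' hx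
      split at hp
      case isTrue hle =>
        have hmx0 : x = m ∧ xs = r := by simpa using hp
        obtain ⟨rfl, rfl⟩ := hmx0
        have hxm' : x.1 ≤ m'.1 := by
          simp only [pvLexLe, Bool.or_eq_true, decide_eq_true_eq, Bool.and_eq_true, beq_iff_eq] at hle
          rcases hle with h1 | ⟨h1, _⟩ <;> omega
        intro p hpmem
        rcases List.mem_cons.mp hpmem with rfl | hpxs
        · exact le_refl _
        · exact le_trans hxm' (ihm p hpxs)
      case isFalse hle =>
        have hmx0 : m' = m ∧ x :: r' = r := by simpa using hp
        obtain ⟨rfl, rfl⟩ := hmx0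
        have hmx : m'.1 ≤ x.1 := by
          simp only [pvLexLe, Bool.or_eq_true, decide_eq_true_eq, Bool.and_eq_true, beq_iff_eq] at hle
          omega
        intro p hpmem
        rcases List.mem_cons.mp hpmem with rfl | hpxs
        · exact hmx
        · exact ihm p hpxs

theorem pvSorted_pop (h : List (Int × Int)) (m : Int × Int) (r : List (Int × Int))
    (hp : pvPopMin h = some (m, r)) :
    PySem.List.sorted (h.map Prod.fst) (fun x => x) false
      = m.1 :: PySem.List.sorted (r.map Prod.fst) (fun x => x) false := by
  have hperm := pvPopMin_perm h m r hp
  have hmin := pvPopMin_min h m r hp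
  have hpermf : ((m :: r).map Prod.fst).Perm (h.map Prod.fst) := hperm.map _
  have h1 : (PySem.List.sorted (h.map Prod.fst) (fun x => x) false).Perm
      (m.1 :: PySem.List.sorted (r.map Prod.fst) (fun x => x) false) := by
    refine (PySem.List.sorted_perm _ _ _).trans ?_
    refine (hpermf.symm).trans ?_
    simp only [List.map_cons]
    exact ((PySem.List.sorted_perm (r.map Prod.fst) (fun x => x) false).symm).cons m.1
  have hs1 : (PySem.List.sorted (h.map Prod.fst) (fun x => x) false).Pairwise (· ≤ ·) := by
    simpa using PySem.List.sorted_pairwise (h.map Prod.fst) (fun x => x)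
  have hs2 : (m.1 :: PySem.List.sorted (r.map Prod.fst) (fun x => x) false).Pairwise (· ≤ ·) := by
    refine List.Pairwise.cons ?_ (by simpa using PySem.List.sorted_pairwise (r.map Prod.fst) (fun x => x))
    intro y hy
    have hy' : y ∈ r.map Prod.fst := by
      exact (PySem.List.mem_sorted (r.map Prod.fst) (fun x => x) false y).mp hy
    obtain ⟨p, hpmem, rfl⟩ := List.mem_map.mp hy'
    exact hmin p (hperm.subset (List.mem_cons_of_mem m hpmem))
  exact h1.eq_of_pairwise (fun a b _ _ hab hba => le_antisymm hab hba) hs1 hs2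

theorem pvPops_fst (j : Nat) (h : List (Int × Int)) (hj : j ≤ h.length) :
    (pvPops j h).map Prod.fst = (PySem.List.sorted (h.map Prod.fst) (fun x => x) false).take j := by
  induction j generalizing h with
  | zero => simp [pvPops]
  | succ j ih =>
    cases hx : pvPopMin h with
    | none =>
      exfalso
      have := (pvPopMin_none_iff h).mp hx
      subst this
      simp at hj
    | some p =>
      obtain ⟨m, r⟩ := p
      have hperm := pvPopMin_perm h m r hx
      have hlen : r.length + 1 = h.length := by simpa using hperm.length_eq
      rw [pvSorted_pop h m r hx]
      simp only [pvPops, hx, List.map_cons, List.take_succ_cons]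
      rw [ih r (by omega)]

theorem pvPops_subperm (j : Nat) (h : List (Int × Int)) :
    ∃ rest, ((pvPops j h) ++ rest).Perm h := by
  induction j generalizing h with
  | zero => exact ⟨h, by simp [pvPops]⟩
  | succ j ih =>
    cases hx : pvPopMin h with
    | none => exact ⟨h, by simp [pvPops, hx]⟩
    | some p =>
      obtain ⟨m, r⟩ := p
      obtain ⟨rest, hrest⟩ := ih r
      refine ⟨rest, ?_⟩
      simp only [pvPops, hx, List.cons_append]
      exact ((hrest.cons m).trans (pvPopMin_perm h m r hx))

theorem pvLoopA_spec (reward1 : List Int) (j : Nat) (h : List (Int × Int))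
    (vis : PySem.Set Int) (out : Int) :
    pvLoopA reward1 j h vis out
      = ((pvPops j h).foldl (fun v p => PySem.Set.add v p.2) vis,
         out + ((pvPops j h).map (fun p => PySem.List.pyGetD reward1 p.2 0)).sum) := by
  induction j generalizing h vis out with
  | zero => simp [pvLoopA, pvPops]
  | succ j ih =>
    cases hx : pvPopMin h with
    | none => simp [pvLoopA, pvPops, hx]
    | some p =>
      obtain ⟨m, r⟩ := p
      simp only [pvLoopA, pvPops, hx]
      rw [ih]
      simp [add_assoc]

theorem pvSumMapAdd {α : Type} (l : List α) (f g : α → Int) :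
    (l.map (fun x => f x + g x)).sum = (l.map f).sum + (l.map g).sum := by
  induction l with
  | nil => simp
  | cons a l ih => simp [ih]; ring

theorem pvSumMapSub {α : Type} (l : List α) (f g : α → Int) :
    (l.map (fun x => f x - g x)).sum = (l.map f).sum - (l.map g).sum := by
  induction l with
  | nil => simp
  | cons a l ih => simp [ih]; ring

theorem pvSumMapNeg {α : Type} (l : List α) (g : α → Int) :
    (l.map (fun x => -(g x))).sum = -((l.map g).sum) := by
  induction l with
  | nil => simp
  | cons a l ih => simp [ih]; ring

theorem pvEnumSum_single (l : List Int) (s j : Int) :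
    ((PySem.List.enumerate l s).map (fun x => if x.1 = j then x.2 else 0)).sum
      = if s ≤ j ∧ j < s + l.length then l.getD (j - s).toNat 0 else 0 := by
  induction l generalizing s with
  | nil =>
    simp only [PySem.List.enumerate_nil, List.map_nil, List.sum_nil, List.length_nil]
    rw [if_neg (by omega)]
  | cons a l ih =>
    rw [PySem.List.enumerate_cons, List.map_cons, List.sum_cons, ih (s + 1)]
    by_cases hsj : s = j
    · subst hsj
      rw [if_pos rfl, if_neg (by omega), if_pos (by simp only [List.length_cons]; push_cast; omega)]
      simp
    · rw [if_neg hsj]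
      by_cases hin : s + 1 ≤ j ∧ j < s + 1 + l.length
      · rw [if_pos hin, if_pos (by simp only [List.length_cons]; push_cast; omega)]
        have h1 : (j - s).toNat = (j - (s + 1)).toNat + 1 := by omega
        rw [h1, List.getD_cons_succ]
        ring
      · rw [if_neg hin, if_neg (by simp only [List.length_cons]; push_cast; omega)]
        simp

theorem pvEnumSum_mem (l : List Int) (s : Int) (I : List Int) (hI : I.Nodup) :
    ((PySem.List.enumerate l s).map (fun x => if x.1 ∈ I then x.2 else 0)).sum
      = (I.map (fun j => if s ≤ j ∧ j < s + l.length then l.getD (j - s).toNat 0 else 0)).sum := by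
  induction I with
  | nil => simp
  | cons j I ih =>
    have hnd := List.nodup_cons.mp hI
    have hpt : ∀ x : Int × Int,
        (if x.1 ∈ j :: I then x.2 else 0)
          = (if x.1 = j then x.2 else 0) + (if x.1 ∈ I then x.2 else 0) := by
      intro x
      by_cases hxj : x.1 = j
      · subst hxj
        rw [if_pos (List.mem_cons_self), if_pos rfl, if_neg hnd.1]
        ring
      · rw [if_neg hxj]
        by_cases hxI : x.1 ∈ I
        · rw [if_pos (List.mem_cons_of_mem _ hxI), if_pos hxI]
          ring
        · rw [if_neg (by simp [hxj, hxI]), if_neg hxI]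
          ring
    calc ((PySem.List.enumerate l s).map (fun x => if x.1 ∈ j :: I then x.2 else 0)).sum
        = ((PySem.List.enumerate l s).map
            (fun x => (if x.1 = j then x.2 else 0) + (if x.1 ∈ I then x.2 else 0))).sum := by
          exact congrArg List.sum (List.map_congr_left (fun x _ => hpt x))
      _ = ((PySem.List.enumerate l s).map (fun x => if x.1 = j then x.2 else 0)).sum
            + ((PySem.List.enumerate l s).map (fun x => if x.1 ∈ I then x.2 else 0)).sum :=
          pvSumMapAdd _ _ _
      _ = _ := by rw [pvEnumSum_single, ih hnd.2, List.map_cons, List.sum_cons]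

theorem pvZipDiffs (reward1 reward2 : List Int) (hlen : reward1.length ≤ reward2.length) :
    (PySem.List.pyRange 0 (reward1.length : Int) 1).map
        (fun i => PySem.List.pyGetD reward2 i 0 - PySem.List.pyGetD reward1 i 0)
      = (reward1.zip reward2).map (fun p => p.2 - p.1) := by
  apply List.ext_getElem
  · simp [PySem.List.length_pyRange_one]
    omega
  · intro i h1 h2
    have hi : i < reward1.length := by
      simpa [PySem.List.length_pyRange_one] using h1
    have hi2 : i < reward2.length := by omega
    rw [List.getElem_map, List.getElem_map, PySem.List.getElem_pyRange_one, List.getElem_zip]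
    simp only [zero_add]
    rw [PySem.List.pyGetD_natCast, PySem.List.pyGetD_natCast,
        List.getD_eq_getElem _ _ hi2, List.getD_eq_getElem _ _ hi]

theorem pvMain (r1 r2 : List Int) (k : Int)
    (hk0 : 0 ≤ k) (hkn : k ≤ (r1.length : Int)) (hlen : r1.length ≤ r2.length) :
    miceAndCheese r1 r2 k = miceAndCheese_alt r1 r2 k := by
  unfold miceAndCheese miceAndCheese_alt
  simp only []
  set pairs := (PySem.List.pyRange 0 (r1.length : Int) 1).map
      (fun i => (PySem.List.pyGetD r2 i 0 - PySem.List.pyGetD r1 i 0, i)) with hpairs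
  have hppLen : pairs.length = r1.length := by
    simp [hpairs, PySem.List.length_pyRange_one]
  have hkn' : k.toNat ≤ pairs.length := by rw [hppLen]; omega
  have hloop := pvLoopA_spec r1 k.toNat pairs PySem.Set.empty 0
  rw [hloop]
  simp only []
  set P := pvPops k.toNat pairs with hP
  -- membership in the visited set
  have hvis : ∀ x : Int,
      PySem.Set.contains (P.foldl (fun v p => PySem.Set.add v p.2) PySem.Set.empty) x = true
        ↔ x ∈ P.map Prod.snd := by
    intro x
    rw [PySem.Set.contains_iff, PySem.Set.mem_foldl_add]
    simp [List.mem_map, eq_comm, PySem.Set.empty]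
  -- facts about the popped pairs
  obtain ⟨rest, hrest⟩ := pvPops_subperm k.toNat pairs
  have hPsub : ∀ p ∈ P, p ∈ pairs := fun p hp => hrest.subset (List.mem_append_left _ hp)
  have hmemPairs : ∀ p ∈ pairs,
      p.1 = PySem.List.pyGetD r2 p.2 0 - PySem.List.pyGetD r1 p.2 0
        ∧ 0 ≤ p.2 ∧ p.2 < (r1.length : Int) := by
    intro p hp
    obtain ⟨i, hi, rfl⟩ := List.mem_map.mp hp
    have hi' := (PySem.List.mem_pyRange_one).mp hi
    exact ⟨rfl, hi'.1, hi'.2⟩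
  have hsnd : pairs.map Prod.snd = PySem.List.pyRange 0 (r1.length : Int) 1 := by
    rw [hpairs, List.map_map]
    have hid : (Prod.snd ∘ fun i : Int => (PySem.List.pyGetD r2 i 0 - PySem.List.pyGetD r1 i 0, i))
        = fun i : Int => i := rfl
    rw [hid, List.map_id']
  have hndP : (P.map Prod.snd).Nodup := by
    have h2 : (pairs.map Prod.snd).Nodup := by
      rw [hsnd]; exact PySem.List.nodup_pyRange_one 0 _
    have h3 := ((hrest.map Prod.snd).nodup_iff).mpr h2
    rw [List.map_append] at h3
    exact h3.of_append_left
  -- rewrite the skip loop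
  have hbody : ∀ (acc : Int) (x : Int × Int), x ∈ PySem.List.enumerate r2 0 →
      (if PySem.Set.contains (P.foldl (fun v p => PySem.Set.add v p.2) PySem.Set.empty) x.1
        then acc else acc + x.2)
        = acc + (if x.1 ∈ P.map Prod.snd then 0 else x.2) := by
    intro acc x _
    by_cases hx : x.1 ∈ P.map Prod.snd
    · rw [if_pos ((hvis x.1).mpr hx), if_pos hx]; ring
    · rw [if_neg (fun hc => hx ((hvis x.1).mp hc)), if_neg hx]
  rw [PySem.List.foldl_congr_mem _ _ _ _ hbody, PySem.List.foldl_add]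
  -- split the guarded sum
  have hsplit : ((PySem.List.enumerate r2 0).map (fun x => if x.1 ∈ P.map Prod.snd then 0 else x.2)).sum
      = r2.sum - ((PySem.List.enumerate r2 0).map (fun x => if x.1 ∈ P.map Prod.snd then x.2 else 0)).sum := by
    have hpt : ∀ x ∈ PySem.List.enumerate r2 0,
        (fun x : Int × Int => if x.1 ∈ P.map Prod.snd then 0 else x.2) x
          = (fun x : Int × Int => x.2 - (if x.1 ∈ P.map Prod.snd then x.2 else 0)) x := by
      intro x _
      by_cases hx : x.1 ∈ P.map Prod.snd <;> simp [hx]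
    rw [List.map_congr_left hpt, pvSumMapSub]
    rw [show ((PySem.List.enumerate r2 0).map (fun x : Int × Int => x.2)) = r2 from
      PySem.List.map_snd_enumerate r2 0]
  rw [hsplit, pvEnumSum_mem r2 0 (P.map Prod.snd) hndP, List.map_map]
  -- evaluate the indexed sum over the popped pairs
  have hidx : ∀ p ∈ P,
      ((fun j : Int => if 0 ≤ j ∧ j < 0 + (r2.length : Int) then r2.getD (j - 0).toNat 0 else 0) ∘ Prod.snd) p
        = PySem.List.pyGetD r2 p.2 0 := by
    intro p hp
    obtain ⟨_, h0, h1⟩ := hmemPairs p (hPsub p hp)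
    have hr12 : (r1.length : Int) ≤ (r2.length : Int) := by exact_mod_cast hlen
    have hcond : 0 ≤ p.2 ∧ p.2 < 0 + (r2.length : Int) := ⟨h0, by omega⟩
    simp only [Function.comp, sub_zero]
    rw [if_pos hcond]
    rw [PySem.List.pyGetD_eq_getElem r2 0 h0 (by omega), List.getD_eq_getElem _ _ (by omega)]
  rw [List.map_congr_left hidx]
  -- combine the two sums over P into the sum of popped differences
  have hcomb : ((P.map (fun p => PySem.List.pyGetD r1 p.2 0)).sum
        - (P.map (fun p => PySem.List.pyGetD r2 p.2 0)).sum)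
      = -((P.map Prod.fst).sum) := by
    rw [← pvSumMapSub, ← pvSumMapNeg]
    apply congrArg List.sum
    apply List.map_congr_left
    intro p hp
    have := (hmemPairs p (hPsub p hp)).1
    omega
  -- identify the popped differences with the k smallest sorted differences
  have hfst : P.map Prod.fst
      = (PySem.List.sorted ((r1.zip r2).map (fun p => p.2 - p.1)) (fun x => x) false).take k.toNat := by
    rw [hP, pvPops_fst k.toNat pairs hkn', hpairs, List.map_map]
    have hcc : (Prod.fst ∘ fun i : Int => (PySem.List.pyGetD r2 i 0 - PySem.List.pyGetD r1 i 0, i))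
        = fun i : Int => PySem.List.pyGetD r2 i 0 - PySem.List.pyGetD r1 i 0 := rfl
    rw [hcc, pvZipDiffs r1 r2 hlen]
  rw [PySem.List.slice_to _ hk0, ← hfst]
  linarith [hcomb]
-- ===== VERDICT (by name: the statement is the Claim_ definition above) =====
theorem miceAndCheese_spec : Claim_equal_miceAndCheese := by
  intro r1 r2 k _ hpre
  obtain ⟨hk0, hkn, hlen⟩ := hpre
  exact pvMain r1 r2 k hk0 hkn hlen
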